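-- pv_equiv track=rewrite | github.com/Oleg-Derkach/001-CS | untitled0.py | nonrepetitive
-- ===== SOURCE A (Python) =====
-- def nonrepetitive(s):
--     """str >bool
--     returns True if the given string in nonrepetitive and False otherwise.
--     A nonrepetitive string is one that does not contain any sobsting twice in a row.
--     """
--
--     for i in range(len(s)):
--         for x in range(i,len(s)-1):
--             lookFor = s[i:x+1]
--             lookIn = s[x+1:x+1+len(lookFor)]
--             if lookFor == lookIn:
--                 return False
--     return True
-- ===== SOURCE B (Python) =====
-- def nonrepetitive(s):
--     """str >bool
--     True iff s contains no substring repeated twice in a row (no 'square').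
--     For each candidate half-length L, scan once counting consecutive positions
--     where s[i] == s[i+L]; a run of length L means a square of length 2L exists.
--     """
--     n = len(s)
--     for L in range(1, n // 2 + 1):
--         run = 0
--         for i in range(n - L):
--             if s[i] == s[i + L]:
--                 run += 1
--                 if run == L:
--                     return False
--             else:
--                 run = 0
--     return True
-- ===== Notes on version B (the rewrite author's own statement) =====
-- stated objective: alternative
-- what changed: Instead of comparing slice pairs for every (start,end) pair, B scans once per candidate half-length L, counting consecutive positions with s[i]==s[i+L]; a run of length L witnesses a square, so no slices are built at all (intended as faster, O(n^2) vs O(n^3); a timing run could not confirm it at the largest size).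
import Mathlib
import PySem

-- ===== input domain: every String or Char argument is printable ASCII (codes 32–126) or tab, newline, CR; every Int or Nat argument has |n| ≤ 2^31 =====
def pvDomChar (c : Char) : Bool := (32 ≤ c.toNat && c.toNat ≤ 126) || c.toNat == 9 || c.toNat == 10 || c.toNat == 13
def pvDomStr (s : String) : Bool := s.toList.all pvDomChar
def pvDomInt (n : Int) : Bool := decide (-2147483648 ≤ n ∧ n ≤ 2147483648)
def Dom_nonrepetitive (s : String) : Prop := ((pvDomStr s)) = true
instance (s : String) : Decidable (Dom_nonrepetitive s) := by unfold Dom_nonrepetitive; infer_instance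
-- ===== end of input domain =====

-- B replaces A's all-slice-pairs search by a per-half-length run-count scan over character matches s[i]==s[i+L] (no slices built); objective: alternative algorithm.

-- ===== PORT A =====
-- A: for i in range(len(s)): for x in range(i, len(s)-1): compare s[i:x+1] with s[x+1:x+1+len(lookFor)]
def nonrepetitive (s : String) : Bool :=
  let l := s.toList
  let n : Int := l.length
  !((PySem.List.pyRange 0 n 1).any (fun i =>
      (PySem.List.pyRange i (n - 1) 1).any (fun x =>
        let lookFor := PySem.List.slice l (some i) (some (x + 1))
        let lookIn := PySem.List.slice l (some (x + 1)) (some (x + 1 + (lookFor.length : Int)))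
        lookFor == lookIn)))

-- ===== PORT B =====
-- inner loop of B: for i in range(n-L): run-count consecutive matches s[i]==s[i+L]; true = square found ('return False')
def altInner (l : List Char) (L : Nat) (i run : Nat) : Bool :=
  if i + L < l.length then
    if l.getD i ' ' == l.getD (i + L) ' ' then
      if run + 1 == L then true
      else altInner l L (i + 1) (run + 1)
    else altInner l L (i + 1) 0
  else false
termination_by l.length - i

-- outer loop of B: for L in range(1, n//2 + 1), i.e. L ∈ [1 .. n/2]
def nonrepetitive_alt (s : String) : Bool :=
  let l := s.toList
  !((List.range' 1 (l.length / 2)).any (fun L => altInner l L 0 0))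

-- ===== PRECONDITION & SPEC =====
def Spec_nonrepetitive (s : String) (out : Bool) : Prop := out = nonrepetitive_alt s
instance (s : String) (out : Bool) : Decidable (Spec_nonrepetitive s out) := by unfold Spec_nonrepetitive; infer_instance

-- ===== CLAIM (what is proved, stated in full; the proofs are below) =====
def Claim_equal_nonrepetitive : Prop := ∀ (s : String), Dom_nonrepetitive s → Spec_nonrepetitive s (nonrepetitive s)

-- ===== LEMMAS AND PROOFS =====

-- a square of half-length L at position p
def HasSqAt (l : List Char) (p L : Nat) : Prop :=
  p + L + L ≤ l.length ∧ ∀ k < L, l.getD (p + k) ' ' = l.getD (p + L + k) ' '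

def HasSq (l : List Char) : Prop := ∃ p L, 1 ≤ L ∧ HasSqAt l p L

-- equal windows ↔ pointwise equal characters
lemma window_eq_iff (l : List Char) (a b m : Nat) (ha : a + m ≤ l.length) (hb : b + m ≤ l.length) :
    ((l.drop a).take m = (l.drop b).take m) ↔ ∀ k < m, l.getD (a + k) ' ' = l.getD (b + k) ' ' := by
  constructor
  · intro h k hk
    have h1 : ((l.drop a).take m).getD k ' ' = ((l.drop b).take m).getD k ' ' := by rw [h]
    simpa [List.getD_eq_getElem?_getD, List.getElem?_take_of_lt, hk, List.getElem?_drop] using h1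
  · intro h
    apply List.ext_getElem
    · simp; omega
    · intro k hk1 hk2
      have hk : k < m := by simp at hk1; omega
      have := h k hk
      simp only [List.getD_eq_getElem?_getD] at this
      rw [List.getElem_take, List.getElem_take, List.getElem_drop, List.getElem_drop]
      have e1 : l[a + k]? = some (l[a + k]'(by omega)) := List.getElem?_eq_getElem (by omega)
      have e2 : l[b + k]? = some (l[b + k]'(by omega)) := List.getElem?_eq_getElem (by omega)
      rw [e1, e2] at this
      simpa using this

-- A's nested slice search succeeds iff some square exists
lemma portA_any (l : List Char) :
    ((PySem.List.pyRange 0 (l.length : Int) 1).any (fun i =>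
      (PySem.List.pyRange i ((l.length : Int) - 1) 1).any (fun x =>
        let lookFor := PySem.List.slice l (some i) (some (x + 1))
        let lookIn := PySem.List.slice l (some (x + 1)) (some (x + 1 + (lookFor.length : Int)))
        lookFor == lookIn))) = true ↔ HasSq l := by
  simp only [List.any_eq_true, PySem.List.mem_pyRange_one, beq_iff_eq]
  constructor
  · rintro ⟨i, ⟨hi0, hin⟩, x, ⟨hxi, hxn⟩, heq⟩
    rw [PySem.List.slice_toNat _ hi0 (by omega)] at heq
    set p := i.toNat with hp
    set q := (x + 1).toNat with hq
    have hpq : p < q := by omega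
    have hqn : q < l.length := by omega
    have hlenFor : ((l.drop p).take ((x+1).toNat - p)).length = q - p := by
      simp; omega
    rw [hlenFor] at heq
    have e3 : (x + 1) + ((q - p : Nat) : Int) = ((q + (q - p) : Nat) : Int) := by omega
    rw [e3, PySem.List.slice_toNat _ (by omega) (by positivity)] at heq
    simp only [Int.toNat_natCast] at heq
    have e4 : q + (q - p) - q = q - p := by omega
    rw [e4] at heq
    have hlen2 : ((l.drop q).take (q - p)).length = q - p := by rw [← heq]; exact hlenFor
    have hfull : q + (q - p) ≤ l.length := by simp at hlen2; omega
    refine ⟨p, q - p, by omega, by omega, ?_⟩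
    have hptw := (window_eq_iff l p q (q - p) (by omega) (by omega)).1 heq
    intro k hk
    have e5 : p + (q - p) + k = q + k := by omega
    rw [e5]; exact hptw k hk
  · rintro ⟨p, L, hL1, hle, hmatch⟩
    refine ⟨(p : Int), ⟨by positivity, by exact_mod_cast by omega⟩,
            ((p + L - 1 : Nat) : Int), ⟨by exact_mod_cast by omega, by omega⟩, ?_⟩
    have e1 : ((p + L - 1 : Nat) : Int) + 1 = ((p + L : Nat) : Int) := by omega
    rw [e1, PySem.List.slice_toNat _ (by positivity) (by positivity)]
    simp only [Int.toNat_natCast]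
    have elen : ((l.drop p).take (p + L - p)).length = L := by simp; omega
    rw [elen]
    have e2 : ((p + L : Nat) : Int) + (L : Int) = ((p + L + L : Nat) : Int) := by omega
    rw [e2, PySem.List.slice_toNat _ (by positivity) (by positivity)]
    simp only [Int.toNat_natCast]
    have em1 : p + L - p = L := by omega
    have em2 : p + L + L - (p + L) = L := by omega
    rw [em1, em2]
    exact (window_eq_iff l p (p + L) L (by omega) (by omega)).2 (fun k hk => hmatch k hk)

-- B's inner scan finds a square iff one of half-length L starts at some position ≥ i - run,
-- given that run consecutive matches end just before index i
lemma altInner_iff (l : List Char) (L : Nat) (hL : 1 ≤ L) :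
    ∀ i run, run ≤ i → run < L →
      (∀ t < run, l.getD (i - run + t) ' ' = l.getD (i - run + t + L) ' ') →
      (altInner l L i run = true ↔ ∃ p, i - run ≤ p ∧ HasSqAt l p L) := by
  intro i
  induction hw : l.length - i using Nat.strong_induction_on generalizing i with
  | _ fuel IH =>
    intro run hri hrL hinv
    rw [altInner]
    by_cases hin : i + L < l.length
    · rw [if_pos hin]
      by_cases hmatch : l.getD i ' ' = l.getD (i + L) ' '
      · rw [if_pos (beq_iff_eq.mpr hmatch)]
        by_cases hfin : run + 1 = L
        · rw [if_pos (beq_iff_eq.mpr hfin)]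
          simp only [true_iff]
          refine ⟨i - run, le_refl _, by omega, ?_⟩
          intro k hk
          by_cases hkr : k < run
          · have := hinv k hkr
            rw [this]
            congr 1
            omega
          · have hk' : k = run := by omega
            have e : i - run + k = i := by omega
            have e2 : i - run + L + k = i + L := by omega
            rw [e, e2]; exact hmatch
        · rw [if_neg (by simpa using hfin)]
          rw [IH (l.length - (i+1)) (by omega) (i+1) rfl (run+1) (by omega) (by omega) ?_]
          · constructor
            · rintro ⟨p, hp, hsq⟩; exact ⟨p, by omega, hsq⟩
            · rintro ⟨p, hp, hsq⟩; exact ⟨p, by omega, hsq⟩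
          · intro t ht
            by_cases htr : t < run
            · have := hinv t htr
              have e : i + 1 - (run + 1) = i - run := by omega
              rw [e]; exact this
            · have ht' : t = run := by omega
              have e : i + 1 - (run + 1) + t = i := by omega
              rw [e]; exact hmatch
      · rw [if_neg (by simpa using hmatch)]
        rw [IH (l.length - (i+1)) (by omega) (i+1) rfl 0 (by omega) (by omega) (by omega)]
        constructor
        · rintro ⟨p, hp, hsq⟩; exact ⟨p, by omega, hsq⟩
        · rintro ⟨p, hp, hsq⟩
          refine ⟨p, ?_, hsq⟩
          by_contra hlt
          have hik : i - p < L := by omega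
          have := hsq.2 (i - p) hik
          have e : p + (i - p) = i := by omega
          have e2 : p + L + (i - p) = i + L := by omega
          rw [e, e2] at this
          exact hmatch this
    · rw [if_neg hin]
      simp only [Bool.false_eq_true, false_iff]
      rintro ⟨p, hp, hle, _⟩
      omega

-- B's outer loop succeeds iff some square exists
lemma portB_any (l : List Char) :
    ((List.range' 1 (l.length / 2)).any (fun L => altInner l L 0 0)) = true ↔ HasSq l := by
  simp only [List.any_eq_true, List.mem_range'_1]
  constructor
  · rintro ⟨L, ⟨hL1, hL2⟩, hfound⟩
    obtain ⟨p, _, hsq⟩ :=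
      (altInner_iff l L hL1 0 0 (by omega) (by omega) (fun t ht => absurd ht (by omega))).1 hfound
    exact ⟨p, L, hL1, hsq⟩
  · rintro ⟨p, L, hL1, hsq⟩
    refine ⟨L, ⟨hL1, by have := hsq.1; omega⟩, ?_⟩
    exact (altInner_iff l L hL1 0 0 (by omega) (by omega) (fun t ht => absurd ht (by omega))).2
      ⟨p, by omega, hsq⟩

-- ===== VERDICT (by name: the statement is the Claim_ definition above) =====
theorem nonrepetitive_spec : Claim_equal_nonrepetitive := by
  intro s _
  show nonrepetitive s = nonrepetitive_alt s
  have hA : nonrepetitive s =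
      !((PySem.List.pyRange 0 (s.toList.length : Int) 1).any (fun i =>
        (PySem.List.pyRange i ((s.toList.length : Int) - 1) 1).any (fun x =>
          let lookFor := PySem.List.slice s.toList (some i) (some (x + 1))
          let lookIn := PySem.List.slice s.toList (some (x + 1)) (some (x + 1 + (lookFor.length : Int)))
          lookFor == lookIn))) := rfl
  have hB : nonrepetitive_alt s =
      !((List.range' 1 (s.toList.length / 2)).any (fun L => altInner s.toList L 0 0)) := rfl
  rw [hA, hB]
  congr 1
  rw [Bool.eq_iff_iff, portA_any, portB_any]
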